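-- pv_equiv track=rewrite | github.com/johnmungandiall/project-renamer | utils.py | preserve_case
-- ===== SOURCE A (Python) =====
-- def preserve_case(original: str, replacement: str) -> str:
--     """Replace text while preserving the case pattern of the original."""
--     if original.isupper():
--         return replacement.upper()
--     elif original.islower():
--         return replacement.lower()
--     elif original.istitle():
--         return replacement.title()
--     else:
--         # Mixed case - try to preserve pattern
--         result = ""
--         rep_index = 0
--
--         for char in original:
--             if rep_index >= len(replacement):
--                 result += char
--                 continue
--
--             if char.isupper():
--                 result += replacement[rep_index].upper()
--             elif char.islower():
--                 result += replacement[rep_index].lower()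
--             elif char.isdigit():
--                 result += replacement[rep_index]
--             else:
--                 result += replacement[rep_index]
--
--             rep_index += 1
--
--         # Add remaining characters from replacement if any
--         if rep_index < len(replacement):
--             result += replacement[rep_index:]
--
--         return result
-- ===== SOURCE B (Python) =====
-- def preserve_case(original: str, replacement: str) -> str:
--     """Replace text while preserving the case pattern of the original."""
--     if original.isupper():
--         return replacement.upper()
--     if original.islower():
--         return replacement.lower()
--     if original.istitle():
--         return replacement.title()
--     # Mixed case, staged: (1) extract the original's case mask, (2) build a
--     # table of whole-string case variants of the replacement once, (3) assemble
--     # the output by selecting each position from the variant named by the mask,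
--     # then append both untouched tails.
--     mask = ['U' if c.isupper() else 'L' if c.islower() else '-' for c in original]
--     variants = {'U': replacement.upper(), 'L': replacement.lower(), '-': replacement}
--     n = min(len(original), len(replacement))
--     body = ''.join(variants[m][i] for i, m in enumerate(mask[:n]))
--     return body + replacement[n:] + original[n:]
-- ===== Notes on version B (the rewrite author's own statement) =====
-- stated objective: alternative
-- what changed: The mixed-case branch is split into staged passes: extract a case mask from the original, precompute a table of whole-string upper/lower/identity variants of the replacement once, and assemble the output by table selection per mask symbol plus two untouched tail slices, instead of A's single loop transforming each replacement char in place under a running rep_index.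
import Mathlib
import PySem

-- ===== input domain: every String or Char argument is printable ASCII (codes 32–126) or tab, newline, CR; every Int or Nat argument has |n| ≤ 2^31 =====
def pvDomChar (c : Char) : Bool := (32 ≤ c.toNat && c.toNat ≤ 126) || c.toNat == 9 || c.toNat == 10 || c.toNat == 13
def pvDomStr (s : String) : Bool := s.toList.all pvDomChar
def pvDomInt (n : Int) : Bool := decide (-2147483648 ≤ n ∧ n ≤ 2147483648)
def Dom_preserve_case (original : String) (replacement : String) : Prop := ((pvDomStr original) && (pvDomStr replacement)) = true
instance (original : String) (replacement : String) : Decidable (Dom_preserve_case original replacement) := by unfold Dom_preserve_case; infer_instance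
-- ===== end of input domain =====

-- B restages the mixed-case branch: extract a case mask of the original, build a table
-- of whole-string case variants of the replacement once, then assemble by table
-- selection plus two tail slices, instead of A's rep_index loop (objective: alternative).

-- ===== PORT A =====
-- Hand ports of the str built-ins A calls (exact on the ASCII domain, where the
-- cased characters are exactly the alphabetic ones):
-- str.isupper(): at least one cased char and no lowercase char.
def pcIsupperStr (cs : List Char) : Bool :=
  cs.any PySem.Chars.isalpha && !cs.any PySem.Chars.islower
-- str.islower(): at least one cased char and no uppercase char.
def pcIslowerStr (cs : List Char) : Bool :=
  cs.any PySem.Chars.isalpha && !cs.any PySem.Chars.isupper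
-- str.istitle(): uppercase only after an uncased char, lowercase only after a
-- cased char, and at least one cased char. State: (previous char cased, cased seen).
def pcIstitleAux : List Char → Bool → Bool → Bool
  | [], _, seen => seen
  | c :: rest, prev, seen =>
    if PySem.Chars.isupper c then (if prev then false else pcIstitleAux rest true true)
    else if PySem.Chars.islower c then (if !prev then false else pcIstitleAux rest true true)
    else pcIstitleAux rest false seen
def pcIstitleStr (cs : List Char) : Bool := pcIstitleAux cs false false
-- str.title(): a cased char after an uncased one is uppercased, otherwise lowercased.
def pcTitleAux : List Char → Bool → List Char
  | [], _ => []
  | c :: rest, prev =>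
    (if PySem.Chars.isalpha c then (if prev then PySem.Chars.lowerChar c else PySem.Chars.upperChar c) else c)
      :: pcTitleAux rest (PySem.Chars.isalpha c)
def pcTitleStr (cs : List Char) : List Char := pcTitleAux cs false

def preserve_case (original : String) (replacement : String) : String :=
  let o := original.toList
  let r := replacement.toList
  if pcIsupperStr o then PySem.Str.upper replacement
  else if pcIslowerStr o then PySem.Str.lower replacement
  else if pcIstitleStr o then String.ofList (pcTitleStr r)
  else
    -- for char in original, state (result, rep_index); replacement[rep_index] is
    -- guarded in range, so List.getD never uses its default
    let st := o.foldl (fun (st : List Char × Nat) c =>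
      if r.length ≤ st.2 then (st.1 ++ [c], st.2)
      else if PySem.Chars.isupper c then (st.1 ++ [PySem.Chars.upperChar (r.getD st.2 ' ')], st.2 + 1)
      else if PySem.Chars.islower c then (st.1 ++ [PySem.Chars.lowerChar (r.getD st.2 ' ')], st.2 + 1)
      else if PySem.Chars.isdigit c then (st.1 ++ [r.getD st.2 ' '], st.2 + 1)
      else (st.1 ++ [r.getD st.2 ' '], st.2 + 1)) ([], 0)
    if st.2 < r.length then String.ofList (st.1 ++ r.drop st.2) else String.ofList st.1

-- ===== PORT B =====
def preserve_case_alt (original : String) (replacement : String) : String :=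
  let o := original.toList
  let r := replacement.toList
  if pcIsupperStr o then PySem.Str.upper replacement
  else if pcIslowerStr o then PySem.Str.lower replacement
  else if pcIstitleStr o then String.ofList (pcTitleStr r)
  else
    -- stage 1: case mask of the original
    let mask := o.map (fun c =>
      if PySem.Chars.isupper c then 'U' else if PySem.Chars.islower c then 'L' else '-')
    -- stage 2: table of whole-string case variants of the replacement
    let variants : PySem.Dict Char (List Char) :=
      ((PySem.Dict.empty.insert 'U' (PySem.Chars.upper r)).insert 'L' (PySem.Chars.lower r)).insert '-' r
    -- stage 3: select variants[m][i] per mask symbol; i < n ≤ r.length, so the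
    -- getD defaults are never used (variants always contains the mask symbols)
    let n := min o.length r.length
    let body := (PySem.List.enumerate (mask.take n) 0).map
      (fun p => (variants.getD p.2 []).getD p.1.toNat ' ')
    String.ofList (body ++ r.drop n ++ o.drop n)

-- ===== PRECONDITION & SPEC =====
def Spec_preserve_case (original : String) (replacement : String) (out : String) : Prop := out = preserve_case_alt original replacement
instance (original : String) (replacement : String) (out : String) : Decidable (Spec_preserve_case original replacement out) := by unfold Spec_preserve_case; infer_instance

-- ===== CLAIM (what is proved, stated in full; the proofs are below) =====
def Claim_equal_preserve_case : Prop := ∀ (original : String) (replacement : String), Dom_preserve_case original replacement → Spec_preserve_case original replacement (preserve_case original replacement)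

-- ===== LEMMAS AND PROOFS =====

-- The per-position case mapping both branches compute, as a zip-map.
def pcZmap (o r : List Char) : List Char :=
  (o.zip r).map (fun p =>
    if PySem.Chars.isupper p.1 then PySem.Chars.upperChar p.2
    else if PySem.Chars.islower p.1 then PySem.Chars.lowerChar p.2
    else p.2)

-- Invariant of A's loop: from state (res, i) it appends the zip-map of the rest of
-- the replacement, then the original's chars past the replacement, and advances i.
lemma pc_loop_eq (o : List Char) (r : List Char) :
    ∀ (res : List Char) (i : Nat),
    o.foldl (fun (st : List Char × Nat) c =>
      if r.length ≤ st.2 then (st.1 ++ [c], st.2)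
      else if PySem.Chars.isupper c then (st.1 ++ [PySem.Chars.upperChar (r.getD st.2 ' ')], st.2 + 1)
      else if PySem.Chars.islower c then (st.1 ++ [PySem.Chars.lowerChar (r.getD st.2 ' ')], st.2 + 1)
      else if PySem.Chars.isdigit c then (st.1 ++ [r.getD st.2 ' '], st.2 + 1)
      else (st.1 ++ [r.getD st.2 ' '], st.2 + 1)) (res, i)
    = (res ++ pcZmap o (r.drop i) ++ o.drop (r.length - i), i + min o.length (r.length - i)) := by
  induction o with
  | nil => intro res i; simp [pcZmap]
  | cons c o' ih =>
    intro res i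
    by_cases h : r.length ≤ i
    · have hd : r.drop i = [] := List.drop_eq_nil_of_le h
      have hs : r.length - i = 0 := Nat.sub_eq_zero_of_le h
      simp only [List.foldl_cons, if_pos h, ih]
      simp [pcZmap, hd, hs]
    · have hlt : i < r.length := Nat.lt_of_not_le h
      have hd : r.drop i = r[i] :: r.drop (i + 1) := List.drop_eq_getElem_cons hlt
      have hg : r.getD i ' ' = r[i] := List.getD_eq_getElem r ' ' hlt
      have hz : pcZmap (c :: o') (r.drop i) =
          (if PySem.Chars.isupper c then PySem.Chars.upperChar r[i]
           else if PySem.Chars.islower c then PySem.Chars.lowerChar r[i]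
           else r[i]) :: pcZmap o' (r.drop (i + 1)) := by
        rw [hd]; rfl
      have hdrop : (c :: o').drop (r.length - i) = o'.drop (r.length - (i + 1)) := by
        have : r.length - i = (r.length - (i + 1)) + 1 := by omega
        simp [this]
      have hmin : i + min (o'.length + 1) (r.length - i) = (i + 1) + min o'.length (r.length - (i + 1)) := by
        omega
      simp only [List.foldl_cons, if_neg h, hg]
      by_cases hu : PySem.Chars.isupper c
      · simp only [if_pos hu, ih]
        rw [hz, hdrop]
        simp [hu, hmin, List.append_assoc]
      · by_cases hl : PySem.Chars.islower c
        · simp only [if_neg hu, if_pos hl, ih]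
          rw [hz, hdrop]
          simp [hu, hl, hmin, List.append_assoc]
        · by_cases hdg : PySem.Chars.isdigit c
          · simp only [if_neg hu, if_neg hl, if_pos hdg, ih]
            rw [hz, hdrop]
            simp [hu, hl, hmin, List.append_assoc]
          · simp only [if_neg hu, if_neg hl, if_neg hdg, ih]
            rw [hz, hdrop]
            simp [hu, hl, hmin, List.append_assoc]

-- B's staged body (mask → variants table → selection) is the same zip-map.
lemma pc_body_eq (o r : List Char) :
    (PySem.List.enumerate ((o.map (fun c =>
        if PySem.Chars.isupper c then 'U' else if PySem.Chars.islower c then 'L' else '-')).take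
        (min o.length r.length)) 0).map
      (fun p => ((((PySem.Dict.empty.insert 'U' (PySem.Chars.upper r)).insert 'L'
          (PySem.Chars.lower r)).insert '-' r : PySem.Dict Char (List Char)).getD p.2 []).getD p.1.toNat ' ')
    = pcZmap o r := by
  apply List.ext_getElem
  · simp [pcZmap, PySem.List.length_enumerate]
  · intro k h1 h2
    have hk : k < min o.length r.length := by
      simpa [PySem.List.length_enumerate] using h1
    have hko : k < o.length := lt_of_lt_of_le hk (Nat.min_le_left _ _)
    have hkr : k < r.length := lt_of_lt_of_le hk (Nat.min_le_right _ _)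
    rw [List.getElem_map, PySem.List.getElem_enumerate]
    rw [List.getElem_take, List.getElem_map]
    simp only [Int.zero_add, Int.toNat_natCast]
    simp only [pcZmap]; rw [List.getElem_map, List.getElem_zip]
    by_cases hu : PySem.Chars.isupper o[k]
    · simp [hu, PySem.Dict.getD_insert, PySem.Chars.upper, List.getElem?_eq_getElem hkr]
    · by_cases hl : PySem.Chars.islower o[k]
      · simp [hu, hl, PySem.Dict.getD_insert, PySem.Chars.lower, List.getElem?_eq_getElem hkr]
      · simp [hu, hl, List.getElem?_eq_getElem hkr]

-- ===== VERDICT (by name: the statement is the Claim_ definition above) =====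
theorem preserve_case_spec : Claim_equal_preserve_case := by
  intro original replacement _
  unfold Spec_preserve_case preserve_case preserve_case_alt
  dsimp only
  rw [pc_body_eq]
  rw [pc_loop_eq]
  simp only [List.drop_zero, Nat.sub_zero, Nat.zero_add, List.nil_append]
  set o := original.toList
  set r := replacement.toList
  by_cases h : o.length < r.length
  · have hmin : min o.length r.length = o.length := by omega
    have hod : o.drop r.length = [] := List.drop_eq_nil_of_le (by omega)
    simp [hmin, hod, h]
  · have hmin : min o.length r.length = r.length := by omega
    have hrd : r.drop r.length = [] := by simp
    simp [hmin, hrd]
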